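-- pv_equiv track=rewrite | github.com/harelc2006/CalculatorProject | MinusManage/Trimmer.py | allMinusTrimmer
-- ===== SOURCE A (Python) =====
-- def allMinusTrimmer(exp):
--     """"
--     gets: expression after the sign minus care
--     returns: trims sign minuses and unary minuses to only leaves either 0 or 1 depends on the number of sign
--     minuses/unary minuses
--     """
--     result = []
--     i = 0
--     while i < len(exp):
--         if exp[i] == 'U':
--             minus_count = 0
--             while i < len(exp) and exp[i] == 'U':
--                 minus_count += 1
--                 i += 1
--             if minus_count % 2 == 1:
--                 result.append('U')
--
--         if i < len(exp) and exp[i] == 'S':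
--             minus_count = 0
--             while i < len(exp) and exp[i] == 'S':
--                 minus_count += 1
--                 i += 1
--             if minus_count % 2 == 1:
--                 result.append('S')
--         elif i < len(exp):
--             result.append(exp[i])
--             i += 1
--
--     return ''.join(result)
-- ===== SOURCE B (Python) =====
-- def _emit(run):
--     if run is None:
--         return ''
--     ch, n = run
--     if ch in ('U', 'S'):
--         return ch if n % 2 == 1 else ''
--     return ch * n
--
--
-- def allMinusTrimmer(exp):
--     """Single forward pass keeping the current maximal run as (char, length);
--     flush a run when the character changes, emitting U/S runs by parity and
--     other runs verbatim."""
--     out = []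
--     run = None
--     for c in exp:
--         if run is not None and run[0] == c:
--             run = (c, run[1] + 1)
--         else:
--             out.append(_emit(run))
--             run = (c, 1)
--     out.append(_emit(run))
--     return ''.join(out)
-- ===== Notes on version B (the rewrite author's own statement) =====
-- stated objective: simpler
-- what changed: Replaces A's index-managed outer loop with nested U/S counting while-loops by a single fold over the characters that carries the current maximal run as a (char,length) pair and flushes it by parity (U/S) or verbatim on each change (one pass, no per-index bookkeeping).
import Mathlib
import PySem

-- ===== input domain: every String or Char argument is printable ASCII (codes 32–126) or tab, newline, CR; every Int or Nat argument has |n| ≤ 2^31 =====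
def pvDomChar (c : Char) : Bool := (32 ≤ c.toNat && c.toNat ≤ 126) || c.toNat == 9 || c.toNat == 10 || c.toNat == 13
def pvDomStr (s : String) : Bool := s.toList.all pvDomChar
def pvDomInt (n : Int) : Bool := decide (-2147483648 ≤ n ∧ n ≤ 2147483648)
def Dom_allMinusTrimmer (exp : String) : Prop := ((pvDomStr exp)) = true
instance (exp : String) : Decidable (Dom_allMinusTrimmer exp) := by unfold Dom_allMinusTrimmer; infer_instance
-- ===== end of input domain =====

-- B replaces A's index-managed loop with nested counting while-loops by a single
-- fold carrying the current run as a (char, length) pair; objective: simpler.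

-- ===== PORT A =====
-- A's inner loop 'while i < len(exp) and exp[i] == c: minus_count += 1; i += 1'
-- as a helper returning (count, remaining suffix)
def countRun (c : Char) : List Char → Nat × List Char
  | [] => (0, [])
  | x :: xs => if x = c then ((countRun c xs).1 + 1, (countRun c xs).2) else (0, x :: xs)

theorem countRun_len_le (c : Char) (l : List Char) : (countRun c l).2.length ≤ l.length := by
  induction l with
  | nil => simp [countRun]
  | cons x xs ih =>
    simp only [countRun]
    split
    · exact le_trans ih (by simp)
    · simp

-- one recursive step per iteration of A's outer while-loop
def goA (l : List Char) : List Char :=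
  match l with
  | [] => []
  | x :: xs =>
    if hU : x = 'U' then
      match hr : (countRun 'U' (x :: xs)).2 with
      | [] => (if (countRun 'U' (x :: xs)).1 % 2 = 1 then ['U'] else [])
      | y :: ys =>
        if hS : y = 'S' then
          (if (countRun 'U' (x :: xs)).1 % 2 = 1 then ['U'] else []) ++
            (if (countRun 'S' (y :: ys)).1 % 2 = 1 then ['S'] else []) ++
            goA (countRun 'S' (y :: ys)).2
        else
          (if (countRun 'U' (x :: xs)).1 % 2 = 1 then ['U'] else []) ++ [y] ++ goA ys
    else if hS : x = 'S' then
      (if (countRun 'S' (x :: xs)).1 % 2 = 1 then ['S'] else []) ++ goA (countRun 'S' (x :: xs)).2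
    else
      [x] ++ goA xs
  termination_by l.length
  decreasing_by
  all_goals (
    try subst hU
    try subst hS
    first
      | (have h1 := countRun_len_le 'U' xs
         have h2 := countRun_len_le 'S' ys
         simp_all [countRun] <;> omega)
      | (have h1 := countRun_len_le 'U' xs
         simp_all [countRun] <;> omega)
      | (have h2 := countRun_len_le 'S' xs
         simp_all [countRun] <;> omega)
      | (simp_all [countRun] <;> omega)
      | simp)

def allMinusTrimmer (exp : String) : String := String.mk (goA exp.toList)

-- ===== PORT B =====
def emitB : Option (Char × Nat) → List Char
  | none => []
  | some (c, n) => if c = 'U' ∨ c = 'S' then (if n % 2 = 1 then [c] else []) else List.replicate n c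

def stepB (s : List (List Char) × Option (Char × Nat)) (c : Char) :
    List (List Char) × Option (Char × Nat) :=
  match s.2 with
  | some (rc, rn) =>
    if rc = c then (s.1, some (c, rn + 1)) else (s.1 ++ [emitB s.2], some (c, 1))
  | none => (s.1 ++ [emitB s.2], some (c, 1))

def allMinusTrimmer_alt (exp : String) : String :=
  String.mk ((exp.toList.foldl stepB ([], none)).1 ++
    [emitB (exp.toList.foldl stepB ([], none)).2]).flatten

-- ===== PRECONDITION & SPEC =====
def Spec_allMinusTrimmer (exp : String) (out : String) : Prop := out = allMinusTrimmer_alt exp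
instance (exp : String) (out : String) : Decidable (Spec_allMinusTrimmer exp out) := by unfold Spec_allMinusTrimmer; infer_instance

-- ===== CLAIM (what is proved, stated in full; the proofs are below) =====
def Claim_equal_allMinusTrimmer : Prop := ∀ (exp : String), Dom_allMinusTrimmer exp → Spec_allMinusTrimmer exp (allMinusTrimmer exp)

-- ===== LEMMAS AND PROOFS =====

-- the run-decomposition reference function both ports are proved equal to
def specRuns (l : List Char) : List Char :=
  match l with
  | [] => []
  | x :: xs =>
    emitB (some (x, (countRun x (x :: xs)).1)) ++ specRuns (countRun x (x :: xs)).2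
  termination_by l.length
  decreasing_by
    have := countRun_len_le x xs
    simp only [countRun, List.length_cons, if_true]
    omega

theorem countRun_head_ne (c : Char) (l : List Char) :
    ∀ y ys, (countRun c l).2 = y :: ys → y ≠ c := by
  induction l with
  | nil => simp [countRun]
  | cons x xs ih =>
    intro y ys h
    simp only [countRun] at h
    split at h
    · exact ih y ys h
    · rename_i hx
      cases h
      simpa using hx

theorem specRuns_cons_nonspecial (y : Char) (ys : List Char) (hU : y ≠ 'U') (hS : y ≠ 'S') :
    specRuns (y :: ys) = y :: specRuns ys := by
  cases ys with
  | nil => simp [specRuns, countRun, emitB, hU, hS]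
  | cons z zs =>
    by_cases hz : z = y
    · subst hz
      simp [specRuns, countRun, emitB, hU, hS, List.replicate_succ]
    · simp [specRuns, countRun, hz, emitB, hU, hS]

theorem goA_eq_specRuns (l : List Char) : goA l = specRuns l := by
  induction l using goA.induct with
  | case1 => simp [goA, specRuns]
  | case2 xs hr hodd =>
    rw [goA, specRuns, hr]
    simp [hr, hodd, emitB, specRuns]
  | case3 xs hr hodd =>
    rw [goA, specRuns, hr]
    simp [hr, hodd, emitB, specRuns]
  | case4 xs ys hr ih =>
    rw [goA, specRuns, hr]
    simp only [hr]
    rw [specRuns]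
    simp [emitB, ih]
  | case5 xs y ys hS hr ih =>
    have hyU : y ≠ 'U' := countRun_head_ne 'U' ('U' :: xs) y ys hr
    rw [goA, specRuns, hr]
    simp only [hr]
    rw [specRuns_cons_nonspecial y ys hyU hS]
    simp [emitB, ih, hS]
  | case6 xs hne ih =>
    simp [countRun] at ih
    rw [goA, specRuns]
    simp [countRun, emitB, ih, hne]
  | case7 x xs hU hS ih =>
    rw [goA, specRuns_cons_nonspecial x xs hU hS]
    simp [hU, hS, ih]

-- finishing function for B's fold state
def finB (s : List (List Char) × Option (Char × Nat)) : List Char :=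
  (s.1 ++ [emitB s.2]).flatten

theorem finB_foldl_out (l : List Char) :
    ∀ (out : List (List Char)) (run : Option (Char × Nat)),
      finB (l.foldl stepB (out, run)) = out.flatten ++ finB (l.foldl stepB ([], run)) := by
  induction l with
  | nil => intro out run; simp [finB]
  | cons c cs ih =>
    intro out run
    match run with
    | none =>
      simp only [List.foldl_cons, stepB, List.nil_append]
      rw [ih, ih [emitB none]]
      simp [emitB]
    | some (rc, rn) =>
      by_cases h : rc = c
      · simp only [List.foldl_cons, stepB, if_pos h]
        rw [ih]
      · simp only [List.foldl_cons, stepB, if_neg h, List.nil_append]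
        rw [ih, ih [emitB (some (rc, rn))]]
        simp [finB]

theorem finB_run (l : List Char) :
    ∀ (c : Char) (n : Nat),
      finB (l.foldl stepB ([], some (c, n))) =
        emitB (some (c, n + (countRun c l).1)) ++ finB ((countRun c l).2.foldl stepB ([], none)) := by
  induction l with
  | nil => intro c n; simp [finB, countRun, emitB]
  | cons y ys ih =>
    intro c n
    by_cases h : y = c
    · subst h
      simp only [List.foldl_cons, stepB, countRun, if_true]
      rw [ih]
      ring_nf
    · have hcy : ¬ (c = y) := fun hh => h hh.symm
      simp only [List.foldl_cons, stepB, if_neg hcy, countRun, if_neg h, List.nil_append,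
        Nat.add_zero]
      rw [finB_foldl_out, finB_foldl_out ys [emitB none]]
      simp [emitB]

theorem foldB_eq_specRuns (l : List Char) : finB (l.foldl stepB ([], none)) = specRuns l := by
  induction l using specRuns.induct with
  | case1 => simp [finB, emitB, specRuns]
  | case2 x xs ih =>
    simp only [countRun, if_true] at ih
    rw [specRuns]
    simp only [List.foldl_cons, stepB, List.nil_append]
    rw [finB_foldl_out xs [emitB none], finB_run]
    simp only [countRun, if_true]
    simp [emitB, Nat.add_comm, ih]

-- ===== VERDICT (by name: the statement is the Claim_ definition above) =====
theorem allMinusTrimmer_spec : Claim_equal_allMinusTrimmer := by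
  intro exp _
  unfold Spec_allMinusTrimmer allMinusTrimmer allMinusTrimmer_alt
  rw [goA_eq_specRuns, ← foldB_eq_specRuns]
  rfl
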